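-- pv_equiv track=rewrite | github.com/NickyAlan/codenichiwa-web | __function__.py | text2syllables
-- ===== SOURCE A (Python) =====
-- from string import ascii_lowercase
--
-- def text2syllables(text: str) :
--     """
--     convert long text to syllabels list
--     """
--     text = text.lower().replace(" ", "")
--     syllables = []
--     current_word = ""
--     vowels = ['a','e','i','o','u']
--     for char in text :
--         current_word += char
--         if char in vowels :
--             syllables.append(current_word)
--             current_word = ""
--
--     alphabets = list(set(ascii_lowercase).difference(set(vowels+["y"])))
--     ntext_word = [f'n{alphabet}' for alphabet in alphabets]
--     for idx, syllable in enumerate(syllables) :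
--         if syllable[:2] in ntext_word :
--             syllables.insert(idx, "n")
--             syllables[idx+1] = syllables[idx+1][1:]
--
--     # forgot last "n"
--     if text[-1] == 'n': syllables.append("n")
--     return syllables
-- ===== SOURCE B (Python) =====
-- def text2syllables(text: str):
--     """
--     convert long text to syllabels list
--     """
--     t = text.lower().replace(" ", "")
--     consonants = set("bcdfghjklmnpqrstvwxz")
--     out = []
--     cur = []
--     for ch in t:
--         cur.append(ch)
--         if ch in "aeiou":
--             # emit this syllable, peeling leading "n"+consonant pairs one by one
--             k = 0
--             while cur[k] == "n" and cur[k + 1] in consonants: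
--                 out.append("n")
--                 k += 1
--             out.append("".join(cur[k:]))
--             cur = []
--     if t and t[-1] == "n":
--         out.append("n")
--     return out
-- ===== Notes on version B (the rewrite author's own statement) =====
-- stated objective: faster
-- what changed: B makes one forward pass that emits each vowel-terminated syllable as soon as it is complete, peeling its leading n-plus-consonant pairs on the spot, instead of A's two staged passes (build the full syllable list, then re-walk it with repeated list.insert and slice rewrites) and O(n) string concatenation per character.
-- outside the precondition, e.g. on text2syllables(''): A raises IndexError, B returns []; on text2syllables(' '): A raises IndexError, B returns []
-- crash fix: On inputs consisting only of spaces (including the empty string) A raises IndexError at text[-1]; B returns []. — e.g. on text2syllables(""): A raises IndexError, B returns []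
import Mathlib
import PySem

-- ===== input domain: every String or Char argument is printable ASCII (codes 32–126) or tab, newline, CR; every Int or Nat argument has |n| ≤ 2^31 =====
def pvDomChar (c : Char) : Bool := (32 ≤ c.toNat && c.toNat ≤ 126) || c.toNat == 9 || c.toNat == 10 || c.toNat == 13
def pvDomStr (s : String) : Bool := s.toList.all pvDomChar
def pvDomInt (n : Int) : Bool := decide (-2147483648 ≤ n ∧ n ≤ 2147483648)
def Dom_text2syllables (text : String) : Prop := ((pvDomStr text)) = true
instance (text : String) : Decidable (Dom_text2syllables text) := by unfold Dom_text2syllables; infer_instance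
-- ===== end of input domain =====

-- B replaces A's two staged passes (build all syllables, then re-walk the list with repeated
-- list.insert and slice rewrites) by one forward pass that emits each syllable, peeled, as soon
-- as it completes.

-- ===== PORT A =====
-- vowels = ['a','e','i','o','u']
def pyA_vowels : List Char := ['a', 'e', 'i', 'o', 'u']

-- alphabets = list(set(ascii_lowercase).difference(set(vowels+["y"]))): the 20 consonant letters
-- other than 'y'.  set() iteration order is arbitrary, but the list is only ever used for
-- MEMBERSHIP (through ntext_word), so enumerating it in alphabetical order is exact.
def pyA_alphabets : List Char := "bcdfghjklmnpqrstvwxz".toList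

-- ntext_word = [f'n{alphabet}' for alphabet in alphabets]  (strings as char lists)
def pyA_ntext : List (List Char) := pyA_alphabets.map (fun a => ['n', a])

-- the first for-loop: state (syllables, current_word); current_word += char, flush on a vowel
def pyA_loop : List Char → List (List Char) → List Char → List (List Char)
  | [], sylls, _cur => sylls
  | c :: cs, sylls, cur =>
    let cur' := cur ++ [c]
    if pyA_vowels.contains c then pyA_loop cs (sylls ++ [cur']) [] else pyA_loop cs sylls cur'

-- the second for-loop: 'for idx, syllable in enumerate(syllables)' iterates the LIVE list mutated
-- by 'syllables.insert(idx, "n"); syllables[idx+1] = syllables[idx+1][1:]'.  After the insert the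
-- next iteration (idx+1) revisits the stripped syllable, so the loop is exactly this recursion on
-- the not-yet-visited suffix: emit "n" and retry on the stripped head, else keep and move on.
def pyA_fix : List (List Char) → List (List Char)
  | [] => []
  | s :: rest =>
    if h : pyA_ntext.contains (PySem.List.slice s none (some 2)) then
      ['n'] :: pyA_fix (s.drop 1 :: rest)
    else
      s :: pyA_fix rest
termination_by l => (l.map List.length).sum + l.length
decreasing_by
  · -- the matched prefix s[:2] is a 2-char word, so s is nonempty and drop 1 shortens it
    simp only [List.contains_eq_mem, decide_eq_true_eq, pyA_ntext, List.mem_map] at h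
    obtain ⟨a, -, ha⟩ := h
    have hs : s ≠ [] := by
      intro hnil; rw [hnil] at ha; simp [PySem.List.slice] at ha
    cases s with
    | nil => exact absurd rfl hs
    | cons x xs => simp
  · simp
    omega

def text2syllables (text : String) : List String :=
  -- text = text.lower().replace(" ", "")
  let tS := PySem.Str.replace (PySem.Str.lower text) " " ""
  let t := tS.toList
  let sylls := pyA_loop t [] []
  let fixed := pyA_fix sylls
  -- if text[-1] == 'n': syllables.append("n")   (text[-1] raises IndexError on the empty string:
  -- outside Pre_, where pyGet? returns none and the branch is not taken)
  let final := if PySem.List.pyGet? t (-1) = some 'n' then fixed ++ [['n']] else fixed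
  final.map (fun cs => String.ofList cs)

-- ===== PORT B =====
-- consonants = set("bcdfghjklmnpqrstvwxz")  (only queried for membership)
def pyB_cons : List Char := "bcdfghjklmnpqrstvwxz".toList

-- "aeiou", for the membership test 'ch in "aeiou"'
def pyB_vowels : List Char := "aeiou".toList

-- the inner while loop: k counts peels while cur[k] == 'n' and cur[k+1] is a consonant; reading
-- from index k is recursion on the suffix cur[k:].  (cur ends in a vowel whenever this runs, so
-- cur[k+1] is in range as soon as cur[k] == 'n' holds.)
def pyB_lp : List Char → Nat
  | c1 :: c2 :: rest => if c1 = 'n' && pyB_cons.contains c2 then pyB_lp (c2 :: rest) + 1 else 0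
  | _ => 0

-- the single forward pass: grow cur; on a vowel emit k copies of "n" then "".join(cur[k:])
def pyB_go : List Char → List Char → List (List Char)
  | [], _cur => []
  | c :: cs, cur =>
    let cur' := cur ++ [c]
    if pyB_vowels.contains c then
      (List.replicate (pyB_lp cur') ['n'] ++ [cur'.drop (pyB_lp cur')]) ++ pyB_go cs []
    else
      pyB_go cs cur'

def text2syllables_alt (text : String) : List String :=
  let tS := PySem.Str.replace (PySem.Str.lower text) " " ""
  let t := tS.toList
  let out := pyB_go t []
  -- if t and t[-1] == "n": out.append("n")   (getLast? is the guarded t[-1]: none on empty t)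
  let final := if t.getLast? = some 'n' then out ++ [['n']] else out
  final.map (fun cs => String.ofList cs)

-- ===== PRECONDITION & SPEC =====
-- Pre_ excludes exactly the inputs on which A raises IndexError at text[-1]: strings all of whose
-- characters are spaces (including the empty string), so that text.replace(" ", "") is empty.
def Pre_text2syllables (text : String) : Prop := (text.toList.any (fun c => c ≠ ' ')) = true
instance (text : String) : Decidable (Pre_text2syllables text) := by unfold Pre_text2syllables; infer_instance

def pvWitness_text2syllables : String := "nta no"

-- On inputs consisting only of spaces (including "") A raises IndexError at text[-1]; B returns [].
def Raises_text2syllables (text : String) : Prop := (text.toList.all (fun c => c = ' ')) = true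
instance (text : String) : Decidable (Raises_text2syllables text) := by unfold Raises_text2syllables; infer_instance
def pvRaiseWitness_text2syllables : String := ""
def pvRaiseWitnessOut_text2syllables : List String := []

def Spec_text2syllables (text : String) (out : List String) : Prop := out = text2syllables_alt text
instance (text : String) (out : List String) : Decidable (Spec_text2syllables text out) := by unfold Spec_text2syllables; infer_instance

-- ===== CLAIM (what is proved, stated in full; the proofs are below) =====
def Claim_equal_text2syllables : Prop := ∀ (text : String), Dom_text2syllables text → Pre_text2syllables text → Spec_text2syllables text (text2syllables text)
def Claim_raises_text2syllables : Prop := (∀ (text : String), Dom_text2syllables text → Raises_text2syllables text → ¬ Pre_text2syllables text) ∧ (Dom_text2syllables (pvRaiseWitness_text2syllables) ∧ Raises_text2syllables (pvRaiseWitness_text2syllables) ∧ text2syllables_alt (pvRaiseWitness_text2syllables) = pvRaiseWitnessOut_text2syllables)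

-- ===== LEMMAS AND PROOFS =====

-- the two vowel tests agree
lemma vowels_eq : pyB_vowels = pyA_vowels := by decide

-- membership of a 2-char prefix in ntext_word, phrased with B's consonant test
lemma ntext_mem (c1 c2 : Char) (rest : List Char) :
    pyA_ntext.contains (PySem.List.slice (c1 :: c2 :: rest) none (some 2))
      = (c1 = 'n' && pyB_cons.contains c2) := by
  have h2 : PySem.List.slice (c1 :: c2 :: rest) none (some 2) = [c1, c2] := by simp [pysem]
  have hmem : [c1, c2] ∈ pyA_ntext ↔ c1 = 'n' ∧ c2 ∈ pyA_alphabets := by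
    simp only [pyA_ntext, List.mem_map, List.cons.injEq, and_true]
    constructor
    · rintro ⟨a, ha, h1, h2⟩; exact ⟨h1.symm, h2 ▸ ha⟩
    · rintro ⟨h1, h2⟩; exact ⟨c2, h2, h1.symm, rfl⟩
  rw [h2]
  simp only [List.contains_eq_mem, pyB_cons]
  rw [Bool.eq_iff_iff]
  simp [hmem, pyA_alphabets]

-- short syllables (length < 2) never match ntext_word
lemma ntext_short (s : List Char) (h : s.length < 2) :
    pyA_ntext.contains (PySem.List.slice s none (some 2)) = false := by
  have hs : PySem.List.slice s none (some 2) = s.take 2 := by simp [pysem]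
  rw [hs, List.take_of_length_le (by omega)]
  simp only [pyA_ntext, List.contains_eq_mem, List.mem_map, decide_eq_false_iff_not]
  rintro ⟨a, -, ha⟩
  have := congrArg List.length ha
  simp at this
  omega

-- A's fix pass on one syllable = B's peel count: it emits pyB_lp s copies of "n" and strips that
-- many leading chars, leaving the rest of the list for later
lemma fix_cons (s : List Char) (rest : List (List Char)) :
    pyA_fix (s :: rest)
      = List.replicate (pyB_lp s) ['n'] ++ s.drop (pyB_lp s) :: pyA_fix rest := by
  fun_induction pyB_lp s with
  | case1 c1 c2 tl hif ih =>
    rw [pyA_fix, dif_pos (by rw [ntext_mem]; exact hif)]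
    simp only [List.drop_one, List.tail_cons]
    rw [ih]
    simp [List.replicate_succ]
  | case2 c1 c2 tl hif =>
    rw [pyA_fix, dif_neg (by rw [ntext_mem]; exact hif)]
    simp
  | case3 s h1 =>
    have hlen : s.length < 2 := by
      cases s with
      | nil => simp
      | cons a tl =>
        cases tl with
        | nil => simp
        | cons b tl2 => exact absurd rfl (h1 a b tl2)
    rw [pyA_fix, dif_neg (by rw [ntext_short _ hlen]; simp)]
    cases s <;> simp [pyB_lp]

-- A's first loop in accumulator-free form
lemma loop_acc (t : List Char) :
    ∀ (sylls : List (List Char)) (cur : List Char),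
      pyA_loop t sylls cur = sylls ++ pyA_loop t [] cur := by
  induction t with
  | nil => intro sylls cur; simp [pyA_loop]
  | cons c cs ih =>
    intro sylls cur
    simp only [pyA_loop]
    split
    · rw [ih (sylls ++ [cur ++ [c]]), ih ([] ++ [cur ++ [c]])]
      simp
    · exact ih sylls (cur ++ [c])

-- main correspondence: fixing A's syllable list = B's single pass, for every pending current word
lemma fix_loop (t : List Char) :
    ∀ (cur : List Char), pyA_fix (pyA_loop t [] cur) = pyB_go t cur := by
  induction t with
  | nil =>
    intro cur
    simp [pyA_loop, pyB_go, pyA_fix]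
  | cons c cs ih =>
    intro cur
    by_cases hv : pyA_vowels.contains c
    · have hv2 : pyB_vowels.contains c = true := by rw [vowels_eq]; exact hv
      simp only [pyA_loop, pyB_go, if_pos hv, if_pos hv2, List.nil_append]
      rw [loop_acc, List.singleton_append, fix_cons, ih []]
      simp
    · have hv2 : ¬ pyB_vowels.contains c = true := by rw [vowels_eq]; exact hv
      simp only [pyA_loop, pyB_go, if_neg hv, if_neg hv2]
      exact ih (cur ++ [c])

-- ===== VERDICT (by name: the statements are the Claim_ definitions above) =====
theorem text2syllables_spec : Claim_equal_text2syllables := by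
  intro text _ _
  unfold Spec_text2syllables text2syllables text2syllables_alt
  simp only [fix_loop _ [], PySem.List.pyGet?_neg_one]

def text2syllables_raises : Claim_raises_text2syllables := by
  unfold Claim_raises_text2syllables
  constructor
  · intro text _ hr hp
    unfold Raises_text2syllables at hr
    unfold Pre_text2syllables at hp
    simp only [List.all_eq_true, decide_eq_true_eq] at hr
    simp only [List.any_eq_true, decide_eq_true_eq] at hp
    obtain ⟨c, hc, hne⟩ := hp
    exact hne (hr c hc)
  · exact ⟨by decide, by decide, by decide⟩
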